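-- pv_equiv track=rewrite | github.com/TrezeguetSanteb/TDA | TP-parte1.py | juego_greedy
-- ===== SOURCE A (Python) =====
-- def sofiaa(vec):
--     p= vec[0]
--     u= vec[len(vec)-1]
--
--     if(p>u):
--         vec.pop(0)
--         return p
--     else:
--         vec.pop(len(vec)-1)
--         return u
--
-- def mateoo(vec):
--     p= vec[0]
--     u= vec[len(vec)-1]
--
--     if(p<u):
--         vec.pop(0)
--         return p
--     else:
--         vec.pop(len(vec)-1)
--         return u
--
-- def juego_greedy(vec):
--
--     v_sofia = [] * (len(vec)//2)
--     v_mateo = [] * (len(vec)//2)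
--
--     for i in range(0, len(vec)):
--         if (i%2==0 or i==0):
--             v_sofia.append(sofiaa(vec))
--
--         else:
--             v_mateo.append(mateoo(vec))
--
--     return v_sofia, v_mateo
-- ===== SOURCE B (Python) =====
-- def juego_greedy(vec):
--     # Two-pointer scan over fixed indices; note: unlike A, this does not empty vec in place.
--     v_sofia = []
--     v_mateo = []
--     lo = 0
--     hi = len(vec) - 1
--     sofia_turn = True
--     while lo <= hi:
--         p = vec[lo]
--         u = vec[hi]
--         if sofia_turn:
--             if p > u:
--                 v_sofia.append(p)
--                 lo += 1
--             else:
--                 v_sofia.append(u)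
--                 hi -= 1
--         else:
--             if p < u:
--                 v_mateo.append(p)
--                 lo += 1
--             else:
--                 v_mateo.append(u)
--                 hi -= 1
--         sofia_turn = not sofia_turn
--     return v_sofia, v_mateo
-- ===== Notes on version B (the rewrite author's own statement) =====
-- stated objective: faster
-- what changed: Replaces A's destructive simulation (each turn pops the front or back of the list, pop(0) costing O(n)) with a two-pointer lo/hi scan over the unchanged list and an alternating turn flag; unlike A, B does not empty the caller's list in place.
import Mathlib
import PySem

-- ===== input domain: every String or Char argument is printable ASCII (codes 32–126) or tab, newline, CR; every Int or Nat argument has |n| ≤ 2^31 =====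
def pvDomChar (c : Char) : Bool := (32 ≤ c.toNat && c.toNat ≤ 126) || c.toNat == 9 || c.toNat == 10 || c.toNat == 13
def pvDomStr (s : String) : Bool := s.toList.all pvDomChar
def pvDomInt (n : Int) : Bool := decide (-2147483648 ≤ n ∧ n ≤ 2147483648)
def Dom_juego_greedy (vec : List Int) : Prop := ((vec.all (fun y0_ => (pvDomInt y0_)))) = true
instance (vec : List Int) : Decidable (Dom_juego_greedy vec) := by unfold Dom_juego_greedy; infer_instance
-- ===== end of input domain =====

-- B replaces A's O(n^2) pop-from-the-front list mutation with an O(n) two-pointer scan over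
-- fixed indices (equality is about the RETURN value: Python A empties its argument in place, B does not).

-- ===== PORT A =====
-- sofiaa: returns (popped value, list after the pop); pop(0) = tail, pop(len-1) = dropLast.
-- vec[0] / vec[len-1] are total here via getD 0: inside juego_greedy's loop the list is never empty.
def sofiaa (vec : List Int) : Int × List Int :=
  let p := (PySem.List.pyGet? vec 0).getD 0
  let u := (PySem.List.pyGet? vec ((vec.length : Int) - 1)).getD 0
  if p > u then (p, vec.tail) else (u, vec.dropLast)

def mateoo (vec : List Int) : Int × List Int :=
  let p := (PySem.List.pyGet? vec 0).getD 0
  let u := (PySem.List.pyGet? vec ((vec.length : Int) - 1)).getD 0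
  if p < u then (p, vec.tail) else (u, vec.dropLast)

-- the body of A's for-loop; state = (vec, v_sofia, v_mateo)
def stepA (st : List Int × List Int × List Int) (i : Int) : List Int × List Int × List Int :=
  let v := st.1
  let s := st.2.1
  let m := st.2.2
  if PySem.Int.mod i 2 = 0 ∨ i = 0 then
    let r := sofiaa v
    (r.2, s ++ [r.1], m)
  else
    let r := mateoo v
    (r.2, s, m ++ [r.1])

def juego_greedy (vec : List Int) : List Int × List Int :=
  let st := (PySem.List.pyRange 0 (vec.length : Int) 1).foldl stepA (vec, ([] : List Int), ([] : List Int))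
  st.2

-- ===== PORT B =====
-- two-pointer while-loop of Source B: lo/hi indices into the unchanged vec, alternating turn flag
def altLoop (vec : List Int) (lo hi : Int) (sofiaTurn : Bool) (s m : List Int) : List Int × List Int :=
  if _h : lo ≤ hi then
    let p := (PySem.List.pyGet? vec lo).getD 0
    let u := (PySem.List.pyGet? vec hi).getD 0
    if sofiaTurn then
      if p > u then altLoop vec (lo + 1) hi false (s ++ [p]) m
      else altLoop vec lo (hi - 1) false (s ++ [u]) m
    else
      if p < u then altLoop vec (lo + 1) hi true s (m ++ [p])
      else altLoop vec lo (hi - 1) true s (m ++ [u])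
  else (s, m)
termination_by (hi + 1 - lo).toNat
decreasing_by all_goals omega

def juego_greedy_alt (vec : List Int) : List Int × List Int :=
  altLoop vec 0 ((vec.length : Int) - 1) true [] []

-- ===== PRECONDITION & SPEC =====
def Spec_juego_greedy (vec : List Int) (out : List Int × List Int) : Prop := out = juego_greedy_alt vec
instance (vec : List Int) (out : List Int × List Int) : Decidable (Spec_juego_greedy vec out) := by unfold Spec_juego_greedy; infer_instance

-- ===== CLAIM (what is proved, stated in full; the proofs are below) =====
def Claim_equal_juego_greedy : Prop := ∀ (vec : List Int), Dom_juego_greedy vec → Spec_juego_greedy vec (juego_greedy vec)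

-- ===== LEMMAS AND PROOFS =====


lemma seg_get_left (vec : List Int) (a b : Nat) (hab : a ≤ b) (hb : b < vec.length) :
    ((vec.drop a).take (b + 1 - a))[0]? = some (vec[a]'(by omega)) := by
  rw [List.getElem?_eq_getElem (by simp; omega)]
  simp [List.getElem_take, List.getElem_drop]

lemma seg_get_right (vec : List Int) (a b : Nat) (hab : a ≤ b) (hb : b < vec.length) :
    ((vec.drop a).take (b + 1 - a))[b - a]? = some (vec[b]'hb) := by
  rw [List.getElem?_eq_getElem (by simp; omega)]
  simp only [List.getElem_take, List.getElem_drop,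
    show a + (b - a) = b from by omega]

lemma seg_tail (vec : List Int) (a b : Nat) :
    ((vec.drop a).take (b + 1 - a)).tail = (vec.drop (a + 1)).take (b - a) := by
  rw [← List.drop_one, List.drop_take, List.drop_drop]
  congr 1
  omega

lemma seg_dropLast (vec : List Int) (a b : Nat) (_hab : a ≤ b) (hb : b < vec.length) :
    ((vec.drop a).take (b + 1 - a)).dropLast = (vec.drop a).take (b - a) := by
  rw [List.dropLast_eq_take, List.take_take]
  congr 1
  simp
  omega

lemma seg_len (vec : List Int) (a b : Nat) (_hab : a ≤ b) (hb : b < vec.length) :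
    ((vec.drop a).take (b + 1 - a)).length = b + 1 - a := by
  simp
  omega

lemma sofiaa_seg (vec : List Int) (a b : Nat) (hab : a ≤ b) (hb : b < vec.length) :
    sofiaa ((vec.drop a).take (b + 1 - a)) =
      if vec[a]'(by omega) > vec[b]'hb then
        (vec[a]'(by omega), (vec.drop (a + 1)).take (b - a))
      else (vec[b]'hb, (vec.drop a).take (b - a)) := by
  unfold sofiaa
  rw [seg_len vec a b hab hb]
  have hcast : ((b + 1 - a : Nat) : Int) - 1 = ((b - a : Nat) : Int) := by omega
  rw [hcast]
  rw [PySem.List.pyGet?_zero, PySem.List.pyGet?_natCast]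
  rw [seg_get_left vec a b hab hb, seg_get_right vec a b hab hb]
  rw [seg_tail vec a b, seg_dropLast vec a b hab hb]
  rfl

lemma mateoo_seg (vec : List Int) (a b : Nat) (hab : a ≤ b) (hb : b < vec.length) :
    mateoo ((vec.drop a).take (b + 1 - a)) =
      if vec[a]'(by omega) < vec[b]'hb then
        (vec[a]'(by omega), (vec.drop (a + 1)).take (b - a))
      else (vec[b]'hb, (vec.drop a).take (b - a)) := by
  unfold mateoo
  rw [seg_len vec a b hab hb]
  have hcast : ((b + 1 - a : Nat) : Int) - 1 = ((b - a : Nat) : Int) := by omega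
  rw [hcast]
  rw [PySem.List.pyGet?_zero, PySem.List.pyGet?_natCast]
  rw [seg_get_left vec a b hab hb, seg_get_right vec a b hab hb]
  rw [seg_tail vec a b, seg_dropLast vec a b hab hb]
  rfl

-- A's remaining list after some pops is exactly the segment vec[lo..hi]; the fold over the
-- remaining range indices computes what B's two-pointer loop computes.
lemma loop_eq (vec : List Int) : ∀ (fuel : Nat) (k lo hi : Int) (s m : List Int),
    0 ≤ lo → hi < (vec.length : Int) → 0 ≤ k →
    (vec.length : Int) - k = hi + 1 - lo →
    fuel = (hi + 1 - lo).toNat →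
    ((PySem.List.pyRange k (vec.length : Int) 1).foldl stepA
        ((vec.drop lo.toNat).take fuel, s, m)).2
      = altLoop vec lo hi (decide (k % 2 = 0)) s m := by
  intro fuel
  induction fuel with
  | zero =>
    intro k lo hi s m hlo hhi hk hcnt hfuel
    rw [PySem.List.pyRange_one_eq_nil (by omega)]
    rw [altLoop, dif_neg (by omega)]
    simp [List.foldl]
  | succ f ih =>
    intro k lo hi s m hlo hhi hk hcnt hfuel
    have hkn : k < (vec.length : Int) := by omega
    rw [PySem.List.pyRange_one_cons hkn, List.foldl_cons]
    obtain ⟨a, rfl⟩ : ∃ a : Nat, lo = (a : Int) := ⟨lo.toNat, by omega⟩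
    obtain ⟨b, rfl⟩ : ∃ b : Nat, hi = (b : Int) := ⟨hi.toNat, by omega⟩
    have hab : a ≤ b := by omega
    have hblt : b < vec.length := by omega
    have hfa : f + 1 = b + 1 - a := by omega
    have hfb : f = b - a := by omega
    rw [altLoop, dif_pos (by exact_mod_cast hab)]
    have hpa : (PySem.List.pyGet? vec (a : Int)).getD 0 = vec[a]'(by omega) := by
      rw [PySem.List.pyGet?_natCast, List.getElem?_eq_getElem (by omega)]
      rfl
    have hpb : (PySem.List.pyGet? vec (b : Int)).getD 0 = vec[b]'hblt := by
      rw [PySem.List.pyGet?_natCast, List.getElem?_eq_getElem hblt]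
      rfl
    simp only [hpa, hpb, Int.toNat_natCast, hfa]
    by_cases hpar : k % 2 = 0
    · -- Sofia's turn
      have hmod : PySem.Int.mod k 2 = 0 ∨ k = 0 := by
        left
        rw [PySem.Int.mod_eq_emod_of_pos (by omega : (0:Int) < 2)]
        exact hpar
      have hnext : ¬ ((k + 1) % 2 = 0) := by omega
      simp only [stepA, if_pos hmod, sofiaa_seg vec a b hab hblt, hpar, decide_true,
        if_true]
      by_cases hpu : vec[a]'(by omega) > vec[b]'hblt
      · rw [if_pos hpu, if_pos hpu]
        have := ih (k + 1) ((a : Int) + 1) (b : Int) (s ++ [vec[a]'(by omega)]) m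
          (by omega) (by omega) (by omega) (by omega) (by omega)
        simp only [show ((a : Int) + 1).toNat = a + 1 by omega, hfb] at this ⊢
        rw [this, hnext |> decide_eq_false]
      · rw [if_neg hpu, if_neg hpu]
        have := ih (k + 1) (a : Int) ((b : Int) - 1) (s ++ [vec[b]'hblt]) m
          (by omega) (by omega) (by omega) (by omega) (by omega)
        simp only [Int.toNat_natCast, hfb] at this
        rw [this, hnext |> decide_eq_false]
    · -- Mateo's turn
      have hmod : ¬ (PySem.Int.mod k 2 = 0 ∨ k = 0) := by
        rw [PySem.Int.mod_eq_emod_of_pos (by omega : (0:Int) < 2)]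
        omega
      have hnext : (k + 1) % 2 = 0 := by omega
      simp only [stepA, if_neg hmod, mateoo_seg vec a b hab hblt, hpar, decide_false,
        if_false, Bool.false_eq_true]
      by_cases hpu : vec[a]'(by omega) < vec[b]'hblt
      · rw [if_pos hpu, if_pos hpu]
        have := ih (k + 1) ((a : Int) + 1) (b : Int) s (m ++ [vec[a]'(by omega)])
          (by omega) (by omega) (by omega) (by omega) (by omega)
        simp only [show ((a : Int) + 1).toNat = a + 1 by omega, hfb] at this ⊢
        rw [this, hnext |> decide_eq_true]
      · rw [if_neg hpu, if_neg hpu]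
        have := ih (k + 1) (a : Int) ((b : Int) - 1) s (m ++ [vec[b]'hblt])
          (by omega) (by omega) (by omega) (by omega) (by omega)
        simp only [Int.toNat_natCast, hfb] at this
        rw [this, hnext |> decide_eq_true]


theorem juego_greedy_spec : Claim_equal_juego_greedy := by
  intro vec _
  unfold Spec_juego_greedy juego_greedy juego_greedy_alt
  have := loop_eq vec vec.length 0 0 ((vec.length : Int) - 1) [] []
    (by omega) (by omega) (by omega) (by omega) (by omega)
  simpa using this
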